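-- pv_equiv track=rewrite | github.com/rkhanna23/AutoTriage | services/classifier/classifier.py | _severity_from_reasoning
-- ===== SOURCE A (Python) =====
-- def _impact_scores(title: str, description: str) -> tuple[int, int, int]:
--     text = f"{title} {description}".lower()
--     scope_score = 0
--     if any(phrase in text for phrase in ["all users", "all tenants", "globally", "every region", "across multiple orgs", "multiple stakeholders", "many users"]):
--         scope_score = 3
--     elif any(phrase in text for phrase in ["customers", "multiple orgs", "production", "high impact"]):
--         scope_score = 2
--     elif any(phrase in text for phrase in ["single region", "legacy clients", "edge case", "minor annoyance"]):
--         scope_score = 1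
--
--     business_score = 0
--     if any(phrase in text for phrase in ["security exposure", "data leak", "unauthorized access", "critical", "severely impacted", "cannot be served", "down"]):
--         business_score = 3
--     elif any(phrase in text for phrase in ["blocked", "fails", "overcharged", "timeout", "slowness", "incorrect billing"]):
--         business_score = 2
--     elif any(phrase in text for phrase in ["workaround", "limited", "request", "improve productivity"]):
--         business_score = 1
--
--     urgency_score = 0
--     if any(phrase in text for phrase in ["immediate", "critical", "public bucket", "sql injection", "503", "unreachable"]):
--         urgency_score = 3
--     elif any(phrase in text for phrase in ["observed in production", "reported this today", "peak traffic", "repro count"]):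
--         urgency_score = 2
--     elif any(phrase in text for phrase in ["edge case", "custom settings", "enhancement", "non-urgent"]):
--         urgency_score = 1
--
--     return scope_score, business_score, urgency_score
--
-- def _severity_from_reasoning(category: str, title: str, description: str) -> str:
--     scope_score, business_score, urgency_score = _impact_scores(title, description)
--     total = scope_score + business_score + urgency_score
--     text = f"{title} {description}".lower()
--
--     if category == "Feature Request":
--         return "P2" if any(phrase in text for phrase in ["sla", "export", "webhook", "api", "bulk"]) else "P3"
--
--     if category == "Outage":
--         if total >= 8 or any(
--             phrase in text
--             for phrase in [
--                 "core services are unavailable",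
--                 "production traffic cannot be served",
--                 "critical user workflows are down",
--                 "all customer requests return 503",
--                 "every region",
--                 "all tenants",
--                 "globally",
--             ]
--         ):
--             return "P0"
--         if total >= 6:
--             return "P1"
--         return "P2"
--
--     if category == "Security":
--         if total >= 8 or any(phrase in text for phrase in ["sql injection", "privilege escalation", "unauthorized data access"]):
--             return "P0"
--         if total >= 6:
--             return "P1"
--         return "P2"
--
--     if total >= 8:
--         return "P0"
--     if total >= 6:
--         return "P1"
--     if total >= 4:
--         return "P2"
--     return "P3"
-- ===== SOURCE B (Python) =====
-- _SCOPE = {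
--     "all users": 3, "all tenants": 3, "globally": 3, "every region": 3,
--     "across multiple orgs": 3, "multiple stakeholders": 3, "many users": 3,
--     "customers": 2, "multiple orgs": 2, "production": 2, "high impact": 2,
--     "single region": 1, "legacy clients": 1, "edge case": 1, "minor annoyance": 1,
-- }
-- _BUSINESS = {
--     "security exposure": 3, "data leak": 3, "unauthorized access": 3, "critical": 3,
--     "severely impacted": 3, "cannot be served": 3, "down": 3,
--     "blocked": 2, "fails": 2, "overcharged": 2, "timeout": 2, "slowness": 2, "incorrect billing": 2,
--     "workaround": 1, "limited": 1, "request": 1, "improve productivity": 1,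
-- }
-- _URGENCY = {
--     "immediate": 3, "critical": 3, "public bucket": 3, "sql injection": 3, "503": 3, "unreachable": 3,
--     "observed in production": 2, "reported this today": 2, "peak traffic": 2, "repro count": 2,
--     "edge case": 1, "custom settings": 1, "enhancement": 1, "non-urgent": 1,
-- }
-- _ESCALATION = {
--     "Outage": [
--         "core services are unavailable",
--         "production traffic cannot be served",
--         "critical user workflows are down",
--         "all customer requests return 503",
--         "every region",
--         "all tenants",
--         "globally",
--     ],
--     "Security": ["sql injection", "privilege escalation", "unauthorized data access"],
-- }
-- _CUTS = ((8, "P0"), (6, "P1"), (4, "P2"))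
--
--
-- def _score(table, text):
--     return max((level for phrase, level in table.items() if phrase in text), default=0)
--
--
-- def _severity_from_reasoning(category: str, title: str, description: str) -> str:
--     text = f"{title} {description}".lower()
--     if category == "Feature Request":
--         return "P2" if any(p in text for p in ("sla", "export", "webhook", "api", "bulk")) else "P3"
--     total = _score(_SCOPE, text) + _score(_BUSINESS, text) + _score(_URGENCY, text)
--     esc = _ESCALATION.get(category)
--     if esc is not None:
--         if total >= 8 or any(p in text for p in esc):
--             return "P0"
--         return "P1" if total >= 6 else "P2"
--     for cut, label in _CUTS:
--         if total >= cut: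
--             return label
--     return "P3"
-- ===== Notes on version B (the rewrite author's own statement) =====
-- stated objective: simpler
-- what changed: Replaces the nine cascaded if/elif any() tier blocks by three phrase-to-level tables scored with a single max-over-matching-phrases (default 0), drives the Outage/Security escalation branch from one category-to-escalation-phrases dict lookup, and replaces the trailing P0/P1/P2 threshold chain by a cutoff table scanned in order.
import Mathlib
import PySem

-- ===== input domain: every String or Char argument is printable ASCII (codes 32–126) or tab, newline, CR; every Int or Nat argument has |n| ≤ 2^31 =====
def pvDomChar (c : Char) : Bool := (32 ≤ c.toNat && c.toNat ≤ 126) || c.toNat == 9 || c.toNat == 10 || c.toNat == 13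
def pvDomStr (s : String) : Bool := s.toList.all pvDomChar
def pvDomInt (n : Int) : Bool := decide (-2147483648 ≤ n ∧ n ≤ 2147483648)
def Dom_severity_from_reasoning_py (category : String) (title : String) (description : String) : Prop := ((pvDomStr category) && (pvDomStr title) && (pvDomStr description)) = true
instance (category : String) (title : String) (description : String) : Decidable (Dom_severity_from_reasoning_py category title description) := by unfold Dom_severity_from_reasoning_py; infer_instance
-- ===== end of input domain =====

-- B replaces A's cascaded if/elif any() tier blocks by per-dimension phrase→level tables scored with a
-- max-over-matches, and the trailing P0/P1/P2 threshold chain by a cutoff table scanned in order (objective: simpler).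

-- ===== PORT A =====
def impact_scores_py (title : String) (description : String) : Int × Int × Int :=
  let text := PySem.Str.lower (title ++ " " ++ description)
  let scope_score : Int :=
    if (["all users", "all tenants", "globally", "every region", "across multiple orgs", "multiple stakeholders", "many users"] : List String).any (fun p => PySem.Str.isIn p text) then 3
    else if (["customers", "multiple orgs", "production", "high impact"] : List String).any (fun p => PySem.Str.isIn p text) then 2
    else if (["single region", "legacy clients", "edge case", "minor annoyance"] : List String).any (fun p => PySem.Str.isIn p text) then 1
    else 0
  let business_score : Int :=
    if (["security exposure", "data leak", "unauthorized access", "critical", "severely impacted", "cannot be served", "down"] : List String).any (fun p => PySem.Str.isIn p text) then 3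
    else if (["blocked", "fails", "overcharged", "timeout", "slowness", "incorrect billing"] : List String).any (fun p => PySem.Str.isIn p text) then 2
    else if (["workaround", "limited", "request", "improve productivity"] : List String).any (fun p => PySem.Str.isIn p text) then 1
    else 0
  let urgency_score : Int :=
    if (["immediate", "critical", "public bucket", "sql injection", "503", "unreachable"] : List String).any (fun p => PySem.Str.isIn p text) then 3
    else if (["observed in production", "reported this today", "peak traffic", "repro count"] : List String).any (fun p => PySem.Str.isIn p text) then 2
    else if (["edge case", "custom settings", "enhancement", "non-urgent"] : List String).any (fun p => PySem.Str.isIn p text) then 1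
    else 0
  (scope_score, business_score, urgency_score)

def severity_from_reasoning_py (category : String) (title : String) (description : String) : String :=
  let s := impact_scores_py title description
  let total := s.1 + s.2.1 + s.2.2
  let text := PySem.Str.lower (title ++ " " ++ description)
  if category == "Feature Request" then
    (if (["sla", "export", "webhook", "api", "bulk"] : List String).any (fun p => PySem.Str.isIn p text) then "P2" else "P3")
  else if category == "Outage" then
    (if total ≥ 8 || (["core services are unavailable", "production traffic cannot be served", "critical user workflows are down", "all customer requests return 503", "every region", "all tenants", "globally"] : List String).any (fun p => PySem.Str.isIn p text) then "P0"
     else if total ≥ 6 then "P1" else "P2")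
  else if category == "Security" then
    (if total ≥ 8 || (["sql injection", "privilege escalation", "unauthorized data access"] : List String).any (fun p => PySem.Str.isIn p text) then "P0"
     else if total ≥ 6 then "P1" else "P2")
  else if total ≥ 8 then "P0"
  else if total ≥ 6 then "P1"
  else if total ≥ 4 then "P2"
  else "P3"

-- ===== PORT B =====
def pvScopeTbl : List (String × Int) :=
  [("all users", 3), ("all tenants", 3), ("globally", 3), ("every region", 3), ("across multiple orgs", 3), ("multiple stakeholders", 3), ("many users", 3),
   ("customers", 2), ("multiple orgs", 2), ("production", 2), ("high impact", 2),
   ("single region", 1), ("legacy clients", 1), ("edge case", 1), ("minor annoyance", 1)]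

def pvBusinessTbl : List (String × Int) :=
  [("security exposure", 3), ("data leak", 3), ("unauthorized access", 3), ("critical", 3), ("severely impacted", 3), ("cannot be served", 3), ("down", 3),
   ("blocked", 2), ("fails", 2), ("overcharged", 2), ("timeout", 2), ("slowness", 2), ("incorrect billing", 2),
   ("workaround", 1), ("limited", 1), ("request", 1), ("improve productivity", 1)]

def pvUrgencyTbl : List (String × Int) :=
  [("immediate", 3), ("critical", 3), ("public bucket", 3), ("sql injection", 3), ("503", 3), ("unreachable", 3),
   ("observed in production", 2), ("reported this today", 2), ("peak traffic", 2), ("repro count", 2),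
   ("edge case", 1), ("custom settings", 1), ("enhancement", 1), ("non-urgent", 1)]

def pvEscalation : PySem.Dict String (List String) :=
  ⟨[("Outage", ["core services are unavailable", "production traffic cannot be served", "critical user workflows are down", "all customer requests return 503", "every region", "all tenants", "globally"]),
    ("Security", ["sql injection", "privilege escalation", "unauthorized data access"])]⟩

def pvCuts : List (Int × String) := [(8, "P0"), (6, "P1"), (4, "P2")]

-- max((level for phrase, level in table.items() if phrase in text), default=0)
def pvScore (table : List (String × Int)) (text : String) : Int :=
  PySem.List.maxD (table.filterMap (fun pl => if PySem.Str.isIn pl.1 text then some pl.2 else none)) (fun x => x) 0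

def severity_from_reasoning_py_alt (category : String) (title : String) (description : String) : String :=
  let text := PySem.Str.lower (title ++ " " ++ description)
  if category == "Feature Request" then
    (if (["sla", "export", "webhook", "api", "bulk"] : List String).any (fun p => PySem.Str.isIn p text) then "P2" else "P3")
  else
    let total := pvScore pvScopeTbl text + pvScore pvBusinessTbl text + pvScore pvUrgencyTbl text
    match PySem.Dict.get? pvEscalation category with
    | some esc =>
        if total ≥ 8 || esc.any (fun p => PySem.Str.isIn p text) then "P0"
        else if total ≥ 6 then "P1" else "P2"
    | none =>
        match pvCuts.find? (fun cl => total ≥ cl.1) with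
        | some cl => cl.2
        | none => "P3"

-- ===== PRECONDITION & SPEC =====
def Spec_severity_from_reasoning_py (category : String) (title : String) (description : String) (out : String) : Prop := out = severity_from_reasoning_py_alt category title description
instance (category : String) (title : String) (description : String) (out : String) : Decidable (Spec_severity_from_reasoning_py category title description out) := by unfold Spec_severity_from_reasoning_py; infer_instance

-- ===== CLAIM (what is proved, stated in full; the proofs are below) =====
def Claim_equal_severity_from_reasoning_py : Prop := ∀ (category : String) (title : String) (description : String), Dom_severity_from_reasoning_py category title description → Spec_severity_from_reasoning_py category title description (severity_from_reasoning_py category title description)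

-- ===== LEMMAS AND PROOFS =====

theorem pv_foldl_max_replicate (n : Nat) (k acc : Int) :
    (List.replicate n k).foldl max acc = if n = 0 then acc else max acc k := by
  induction n generalizing acc with
  | zero => simp
  | succ m ih =>
      simp only [List.replicate_succ, List.foldl_cons, ih]
      rcases eq_or_ne m 0 with h | h
      · simp [h, max_def]
      · simp [h, max_def]; split_ifs <;> omega

theorem pv_maxD_replicate_321 (a b c : Nat) :
    PySem.List.maxD (List.replicate a (3 : Int) ++ List.replicate b 2 ++ List.replicate c 1) (fun x => x) 0
      = if a ≠ 0 then 3 else if b ≠ 0 then 2 else if c ≠ 0 then 1 else 0 := by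
  unfold PySem.List.maxD
  rcases a with _ | a
  · rcases b with _ | b
    · rcases c with _ | c
      · decide
      · simp only [List.replicate_zero, List.nil_append, List.replicate_succ, List.append_nil, PySem.List.max?_id_cons, Option.getD_some, pv_foldl_max_replicate]
        split_ifs <;> omega
    · simp only [List.replicate_zero, List.nil_append, List.replicate_succ, List.cons_append,
        PySem.List.max?_id_cons, Option.getD_some, List.foldl_append, pv_foldl_max_replicate]
      split_ifs <;> omega
  · simp only [List.replicate_succ, List.cons_append, PySem.List.max?_id_cons, Option.getD_some,
      List.foldl_append, pv_foldl_max_replicate]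
    split_ifs <;> omega

theorem pv_filterMap_const_ite (l : List String) (m : String → Bool) (k : Int) :
    l.filterMap (fun p => if m p then some k else none)
      = List.replicate (l.countP m) k := by
  induction l with
  | nil => simp
  | cons x xs ih =>
      by_cases h : m x <;>
        simp [h, ih, List.replicate_succ]

theorem pv_countP_ne_zero_iff_any (l : List String) (m : String → Bool) :
    l.countP m ≠ 0 ↔ l.any m = true := by
  rw [Ne, List.countP_eq_zero]
  simp [List.any_eq_true]

theorem pv_score_tag (l3 l2 l1 : List String) (t : String) :
    pvScore (l3.map (fun p => (p, (3 : Int))) ++ l2.map (fun p => (p, 2)) ++ l1.map (fun p => (p, 1))) t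
      = (if l3.any (fun p => PySem.Str.isIn p t) then 3
         else if l2.any (fun p => PySem.Str.isIn p t) then 2
         else if l1.any (fun p => PySem.Str.isIn p t) then 1
         else 0) := by
  unfold pvScore
  simp only [List.filterMap_append, List.filterMap_map, Function.comp_def]
  rw [show (fun p => if PySem.Str.isIn ((p, (3:Int)).1) t then some ((p, (3:Int)).2) else none)
        = (fun p => if PySem.Str.isIn p t then some (3:Int) else none) from rfl,
      show (fun p => if PySem.Str.isIn ((p, (2:Int)).1) t then some ((p, (2:Int)).2) else none)
        = (fun p => if PySem.Str.isIn p t then some (2:Int) else none) from rfl,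
      show (fun p => if PySem.Str.isIn ((p, (1:Int)).1) t then some ((p, (1:Int)).2) else none)
        = (fun p => if PySem.Str.isIn p t then some (1:Int) else none) from rfl,
      pv_filterMap_const_ite, pv_filterMap_const_ite, pv_filterMap_const_ite,
      pv_maxD_replicate_321]
  simp only [pv_countP_ne_zero_iff_any]

theorem pv_scope_score (t : String) :
    pvScore pvScopeTbl t
      = (if (["all users", "all tenants", "globally", "every region", "across multiple orgs", "multiple stakeholders", "many users"] : List String).any (fun p => PySem.Str.isIn p t) then 3
         else if (["customers", "multiple orgs", "production", "high impact"] : List String).any (fun p => PySem.Str.isIn p t) then 2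
         else if (["single region", "legacy clients", "edge case", "minor annoyance"] : List String).any (fun p => PySem.Str.isIn p t) then 1
         else 0) :=
  pv_score_tag ["all users", "all tenants", "globally", "every region", "across multiple orgs", "multiple stakeholders", "many users"] ["customers", "multiple orgs", "production", "high impact"] ["single region", "legacy clients", "edge case", "minor annoyance"] t

theorem pv_business_score (t : String) :
    pvScore pvBusinessTbl t
      = (if (["security exposure", "data leak", "unauthorized access", "critical", "severely impacted", "cannot be served", "down"] : List String).any (fun p => PySem.Str.isIn p t) then 3
         else if (["blocked", "fails", "overcharged", "timeout", "slowness", "incorrect billing"] : List String).any (fun p => PySem.Str.isIn p t) then 2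
         else if (["workaround", "limited", "request", "improve productivity"] : List String).any (fun p => PySem.Str.isIn p t) then 1
         else 0) :=
  pv_score_tag ["security exposure", "data leak", "unauthorized access", "critical", "severely impacted", "cannot be served", "down"] ["blocked", "fails", "overcharged", "timeout", "slowness", "incorrect billing"] ["workaround", "limited", "request", "improve productivity"] t

theorem pv_urgency_score (t : String) :
    pvScore pvUrgencyTbl t
      = (if (["immediate", "critical", "public bucket", "sql injection", "503", "unreachable"] : List String).any (fun p => PySem.Str.isIn p t) then 3
         else if (["observed in production", "reported this today", "peak traffic", "repro count"] : List String).any (fun p => PySem.Str.isIn p t) then 2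
         else if (["edge case", "custom settings", "enhancement", "non-urgent"] : List String).any (fun p => PySem.Str.isIn p t) then 1
         else 0) :=
  pv_score_tag ["immediate", "critical", "public bucket", "sql injection", "503", "unreachable"] ["observed in production", "reported this today", "peak traffic", "repro count"] ["edge case", "custom settings", "enhancement", "non-urgent"] t

-- ===== VERDICT (by name: the statement is the Claim_ definition above) =====


theorem pv_cuts_tail (total : Int) :
    (if total ≥ 8 then "P0" else if total ≥ 6 then "P1" else if total ≥ 4 then "P2" else ("P3" : String))
      = (match pvCuts.find? (fun cl => total ≥ cl.1) with
         | some cl => cl.2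
         | none => "P3") := by
  by_cases h8 : total ≥ 8 <;> by_cases h6 : total ≥ 6 <;> by_cases h4 : total ≥ 4 <;>
    simp [pvCuts, List.find?, h8, h6, h4]

set_option maxHeartbeats 1000000 in
theorem severity_from_reasoning_py_spec : Claim_equal_severity_from_reasoning_py := by
  intro category title description _
  unfold Spec_severity_from_reasoning_py
  unfold severity_from_reasoning_py severity_from_reasoning_py_alt impact_scores_py
  simp only [pv_scope_score, pv_business_score, pv_urgency_score]
  generalize PySem.Str.lower (title ++ " " ++ description) = txt
  by_cases hFR : category = "Feature Request"
  · subst hFR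
    rw [if_pos (show (("Feature Request" : String) == "Feature Request") = true from rfl),
        if_pos (show (("Feature Request" : String) == "Feature Request") = true from rfl)]
  · have nFR : ¬ ((category == "Feature Request") = true) := by simp [beq_iff_eq, hFR]
    by_cases hO : category = "Outage"
    · subst hO
      rw [if_neg nFR, if_neg nFR,
          if_pos (show (("Outage" : String) == "Outage") = true from rfl),
          show PySem.Dict.get? pvEscalation "Outage" = some ["core services are unavailable", "production traffic cannot be served", "critical user workflows are down", "all customer requests return 503", "every region", "all tenants", "globally"] from rfl]
    · have nO : ¬ ((category == "Outage") = true) := by simp [beq_iff_eq, hO]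
      by_cases hS : category = "Security"
      · subst hS
        rw [if_neg nFR, if_neg nFR, if_neg nO,
            if_pos (show (("Security" : String) == "Security") = true from rfl),
            show PySem.Dict.get? pvEscalation "Security" = some ["sql injection", "privilege escalation", "unauthorized data access"] from rfl]
      · have nS : ¬ ((category == "Security") = true) := by simp [beq_iff_eq, hS]
        have hget : PySem.Dict.get? pvEscalation category = none := by
          have h1 : (("Outage" : String) == category) = false := beq_eq_false_iff_ne.mpr (Ne.symm hO)
          have h2 : (("Security" : String) == category) = false := beq_eq_false_iff_ne.mpr (Ne.symm hS)
          simp [PySem.Dict.get?, pvEscalation, List.find?, h1, h2]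
        rw [if_neg nFR, if_neg nFR, if_neg nO, if_neg nS, hget]
        exact pv_cuts_tail _
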